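-- pv_equiv track=rewrite | github.com/furqanarda/lastrada-menu | scripts/generate-complete-local-test-urls.py | get_all_locations
-- ===== SOURCE A (Python) =====
-- LOCAL_URL = "http://localhost:3000"
--
-- def get_all_locations(tokens):
--     """Extract all location data from tokens"""
--     locations = {
--         'room': [],
--         'restaurant': [],
--         'garden': []
--     }
--
--     for key, data in tokens.items():
--         location_type = data.get('type')
--         if location_type in locations:
--             locations[location_type].append({
--                 'location_id': key,
--                 'location_name': data['name'],
--                 'token': data['token'],
--                 'qr_url': f"{LOCAL_URL}?token={data['token']}",
--                 'type': location_type
--             })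
--
--     # Sort each category
--     def sort_key(item):
--         location_id = item['location_id']
--         # Handle numeric IDs (like S1, S10, B1, B10, 101, 201)
--         if location_id.isdigit():
--             return (0, int(location_id))
--         elif len(location_id) > 1 and location_id[1:].isdigit():
--             return (1, int(location_id[1:]))
--         # Handle alphanumeric IDs
--         return (2, location_id)
--
--     for category in locations:
--         locations[category] = sorted(locations[category], key=sort_key)
--
--     return locations
-- ===== SOURCE B (Python) =====
-- LOCAL_URL = "http://localhost:3000"
--
-- def get_all_locations(tokens):
--     """Extract all location data from tokens (sort once, then bucket)"""
--     def sort_key(item):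
--         location_id = item['location_id']
--         if location_id.isdigit():
--             return (0, int(location_id))
--         elif len(location_id) > 1 and location_id[1:].isdigit():
--             return (1, int(location_id[1:]))
--         return (2, location_id)
--
--     combined = [
--         {
--             'location_id': key,
--             'location_name': data['name'],
--             'token': data['token'],
--             'qr_url': f"{LOCAL_URL}?token={data['token']}",
--             'type': data['type'],
--         }
--         for key, data in tokens.items()
--         if data.get('type') in ('room', 'restaurant', 'garden')
--     ]
--
--     result = {'room': [], 'restaurant': [], 'garden': []}
--     for item in sorted(combined, key=sort_key):
--         result[item['type']].append(item)
--     return result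
-- ===== Notes on version B (the rewrite author's own statement) =====
-- stated objective: alternative
-- what changed: A filters tokens into three per-category buckets and sorts each bucket separately; B builds one combined item list, sorts it once with the same stable key, and distributes the sorted items into the three buckets in a single pass.
import Mathlib
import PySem

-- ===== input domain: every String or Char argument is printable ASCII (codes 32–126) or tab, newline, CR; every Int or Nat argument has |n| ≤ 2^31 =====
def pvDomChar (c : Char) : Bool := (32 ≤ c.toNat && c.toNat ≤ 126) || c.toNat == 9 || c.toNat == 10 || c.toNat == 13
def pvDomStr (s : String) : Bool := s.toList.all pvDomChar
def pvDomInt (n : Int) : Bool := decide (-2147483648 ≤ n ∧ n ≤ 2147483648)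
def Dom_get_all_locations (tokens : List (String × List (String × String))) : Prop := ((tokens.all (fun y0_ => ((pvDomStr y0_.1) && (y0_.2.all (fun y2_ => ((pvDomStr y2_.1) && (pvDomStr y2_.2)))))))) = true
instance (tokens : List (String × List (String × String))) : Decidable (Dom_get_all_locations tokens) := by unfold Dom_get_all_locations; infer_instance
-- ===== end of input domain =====

-- B replaces A's three per-category sorts by one stable sort of the combined item list followed
-- by a single bucketing pass (objective: alternative decomposition, same asymptotic cost).

-- dict lookup on an association list, first match (= Python d.get(k) / d[k] where the key is present)
def pvGet? (d : List (String × String)) (k : String) : Option String :=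
  (d.find? (fun p => p.1 == k)).map (fun p => p.2)

-- the item dict built for one token, in Python's insertion order
def pvItem (key name tok t : String) : List (String × String) :=
  [("location_id", key), ("location_name", name), ("token", tok),
   ("qr_url", "http://localhost:3000?token=" ++ tok), ("type", t)]

-- sort_key: Python's tuples (0,int) / (1,int) / (2,str) are encoded lexicographically as
-- Int ×ₗ Int ×ₗ String (exact: tuples with different tags are decided by the tag, equal tags
-- compare values of one type; Python str '<' is Lean String '<' on this ASCII domain)
def pvSortKey (item : List (String × String)) : Lex (Int × Lex (Int × String)) :=
  let lid := (pvGet? item "location_id").getD ""   -- key always present in the items built here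
  if PySem.Str.strIsdigit lid then
    toLex ((0 : Int), toLex (((PySem.Int.ofStr? lid).getD 0), ""))
  else if 1 < PySem.Str.len lid && PySem.Str.strIsdigit (PySem.Str.slice lid (some 1) none) then
    toLex ((1 : Int), toLex (((PySem.Int.ofStr? (PySem.Str.slice lid (some 1) none)).getD 0), ""))
  else
    toLex ((2 : Int), toLex ((0 : Int), lid))

-- locations[k].append(it) for a key k already present in the dict (keys are fixed here)
def pvBump (d : List (String × List (List (String × String)))) (k : String)
    (it : List (String × String)) : List (String × List (List (String × String))) :=
  d.map (fun e => if e.1 == k then (e.1, e.2 ++ [it]) else e)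

-- ===== PORT A =====
-- data['name'] / data['token'] raise KeyError when missing (excluded by Pre_); the port reads getD "".
def get_all_locations (tokens : List (String × List (String × String))) :
    List (String × List (List (String × String))) :=
  let locations : List (String × List (List (String × String))) :=
    [("room", []), ("restaurant", []), ("garden", [])]
  let locations := tokens.foldl (fun locs kd =>
    match pvGet? kd.2 "type" with
    | some t =>
      if (locs.find? (fun e => e.1 == t)).isSome then   -- location_type in locations
        pvBump locs t (pvItem kd.1 ((pvGet? kd.2 "name").getD "")
          ((pvGet? kd.2 "token").getD "") t)
      else locs
    | none => locs) locations
  -- for category in locations: locations[category] = sorted(...): in-place reassignment per key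
  locations.map (fun e => (e.1, PySem.List.sorted e.2 pvSortKey))

-- ===== PORT B =====
-- the comprehension's element: the item dict, if the token's type is one of the three categories
def pvToItem? (kd : String × List (String × String)) : Option (List (String × String)) :=
  match pvGet? kd.2 "type" with
  | some t =>
    if t == "room" || t == "restaurant" || t == "garden" then
      some (pvItem kd.1 ((pvGet? kd.2 "name").getD "") ((pvGet? kd.2 "token").getD "") t)
    else none
  | none => none

def pvTypeOf (it : List (String × String)) : String := (pvGet? it "type").getD ""

def get_all_locations_alt (tokens : List (String × List (String × String))) :
    List (String × List (List (String × String))) :=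
  let combined := tokens.filterMap pvToItem?
  let result : List (String × List (List (String × String))) :=
    [("room", []), ("restaurant", []), ("garden", [])]
  (PySem.List.sorted combined pvSortKey).foldl
    (fun d item => pvBump d (pvTypeOf item) item) result   -- result[item['type']].append(item)

-- ===== PRECONDITION & SPEC =====
-- Pre_ excludes exactly the inputs where Python A raises KeyError: a token whose type is one of
-- the three categories but which lacks a 'name' or 'token' key.
def Pre_get_all_locations (tokens : List (String × List (String × String))) : Prop :=
  ∀ kd ∈ tokens,
    ((pvGet? kd.2 "type").getD "") ∈ (["room", "restaurant", "garden"] : List String) →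
    ((pvGet? kd.2 "name").isSome = true ∧ (pvGet? kd.2 "token").isSome = true)
instance (tokens : List (String × List (String × String))) : Decidable (Pre_get_all_locations tokens) := by unfold Pre_get_all_locations; infer_instance

def pvWitness_get_all_locations : (List (String × List (String × String))) :=
  [("101", [("type", "room"), ("name", "Room 101"), ("token", "abc")]),
   ("S2", [("type", "restaurant"), ("name", "Table S2"), ("token", "t2")])]

def Spec_get_all_locations (tokens : List (String × List (String × String))) (out : List (String × List (List (String × String)))) : Prop := out = get_all_locations_alt tokens
instance (tokens : List (String × List (String × String))) (out : List (String × List (List (String × String)))) : Decidable (Spec_get_all_locations tokens out) := by unfold Spec_get_all_locations; infer_instance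

-- ===== CLAIM (what is proved, stated in full; the proofs are below) =====
def Claim_equal_get_all_locations : Prop := ∀ (tokens : List (String × List (String × String))), Dom_get_all_locations tokens → Pre_get_all_locations tokens → Spec_get_all_locations tokens (get_all_locations tokens)

-- ===== LEMMAS AND PROOFS =====

-- insertBy puts x in front when it goes before every element
theorem pv_insertBy_eq_cons {α : Type} (b : α → α → Bool) (x : α) (zs : List α)
    (h : ∀ z ∈ zs, b x z = true) : PySem.List.insertBy b x zs = x :: zs := by
  cases zs with
  | nil => simp [PySem.List.insertBy]
  | cons z zs => simp [PySem.List.insertBy, h z (by simp)]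

theorem pv_filter_insertBy_neg {α : Type} (p : α → Bool) (b : α → α → Bool) (x : α)
    (hx : p x = false) (ys : List α) :
    (PySem.List.insertBy b x ys).filter p = ys.filter p := by
  induction ys with
  | nil => simp [PySem.List.insertBy, hx]
  | cons y ys ih =>
    by_cases hb : b x y = true
    · simp [PySem.List.insertBy, hb, hx]
    · simp only [PySem.List.insertBy, if_neg hb]
      by_cases hp : p y = true <;> simp [List.filter, hp, ih]

theorem pv_pairwise_insertBy {α κ : Type} [LinearOrder κ] (key : α → κ) (x : α)
    (ys : List α) (h : ys.Pairwise (fun a b => key a ≤ key b)) :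
    (PySem.List.insertBy (fun a b => decide (key a < key b)) x ys).Pairwise
      (fun a b => key a ≤ key b) := by
  induction ys with
  | nil => simp [PySem.List.insertBy]
  | cons y ys ih =>
    rcases List.pairwise_cons.mp h with ⟨hy, hys⟩
    by_cases hb : key x < key y
    · simp only [PySem.List.insertBy, decide_eq_true_eq, if_pos hb]
      refine List.pairwise_cons.mpr ⟨?_, h⟩
      intro z hz
      rcases List.mem_cons.mp hz with hz | hz
      · subst hz; exact le_of_lt hb
      · exact le_trans (le_of_lt hb) (hy z hz)
    · simp only [PySem.List.insertBy, decide_eq_true_eq, if_neg hb]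
      refine List.pairwise_cons.mpr ⟨?_, ih hys⟩
      intro z hz
      rcases (PySem.List.mem_insertBy _ x z ys).mp hz with hz | hz
      · subst hz; exact le_of_not_gt hb
      · exact hy z hz

theorem pv_filter_insertBy_pos {α κ : Type} [LinearOrder κ] (key : α → κ) (p : α → Bool)
    (x : α) (hx : p x = true) (ys : List α)
    (hys : ys.Pairwise (fun a b => key a ≤ key b)) :
    (PySem.List.insertBy (fun a b => decide (key a < key b)) x ys).filter p
      = PySem.List.insertBy (fun a b => decide (key a < key b)) x (ys.filter p) := by
  induction ys with
  | nil => simp [PySem.List.insertBy, hx]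
  | cons y ys ih =>
    rcases List.pairwise_cons.mp hys with ⟨hy, hys'⟩
    by_cases hb : key x < key y
    · simp only [PySem.List.insertBy, decide_eq_true_eq, if_pos hb]
      by_cases hp : p y = true
      · simp [List.filter, hx, hp, PySem.List.insertBy, hb]
      · simp only [List.filter, hx, hp]
        rw [pv_insertBy_eq_cons]
        intro z hz
        have hz' : z ∈ ys := List.mem_of_mem_filter hz
        exact decide_eq_true (lt_of_lt_of_le hb (hy z hz'))
    · simp only [PySem.List.insertBy, decide_eq_true_eq, if_neg hb]
      by_cases hp : p y = true
      · simp [List.filter, hp, PySem.List.insertBy, hb, ih hys']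
      · simp [List.filter, hp, ih hys']

theorem pv_filter_foldl {α κ : Type} [LinearOrder κ] (key : α → κ) (p : α → Bool) :
    ∀ (xs acc : List α), acc.Pairwise (fun a b => key a ≤ key b) →
    (xs.foldl (fun acc x => PySem.List.insertBy (fun a b => decide (key a < key b)) x acc) acc).filter p
      = (xs.filter p).foldl (fun acc x => PySem.List.insertBy (fun a b => decide (key a < key b)) x acc) (acc.filter p) := by
  intro xs
  induction xs with
  | nil => intro acc _; simp
  | cons x xs ih =>
    intro acc hacc
    have hacc' := pv_pairwise_insertBy key x acc hacc
    by_cases hp : p x = true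
    · simp only [List.foldl_cons, List.filter_cons, hp, if_true]
      rw [ih _ hacc', pv_filter_insertBy_pos key p x hp acc hacc]
    · have hp' : p x = false := by simpa using hp
      simp only [List.foldl_cons, List.filter_cons, hp']
      rw [ih _ hacc', pv_filter_insertBy_neg p _ x hp' acc]
      simp

-- stable sort commutes with filter
theorem pv_filter_sorted {α κ : Type} [LinearOrder κ] (key : α → κ) (p : α → Bool)
    (xs : List α) :
    (PySem.List.sorted xs key).filter p = PySem.List.sorted (xs.filter p) key := by
  rw [PySem.List.sorted_eq_foldl_insertBy, PySem.List.sorted_eq_foldl_insertBy]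
  simpa using pv_filter_foldl key p xs [] List.Pairwise.nil

def pvIsT (t : String) (it : List (String × String)) : Bool := pvTypeOf it == t

theorem pvTypeOf_pvItem (k n tk t : String) : pvTypeOf (pvItem k n tk t) = t := by
  simp [pvTypeOf, pvItem, pvGet?, List.find?]

theorem pvToItem?_none (kd : String × List (String × String))
    (hg : pvGet? kd.2 "type" = none) : pvToItem? kd = none := by
  unfold pvToItem?; rw [hg]

theorem pvToItem?_some (kd : String × List (String × String)) (t : String)
    (hg : pvGet? kd.2 "type" = some t) :
    pvToItem? kd = if t == "room" || t == "restaurant" || t == "garden" then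
      some (pvItem kd.1 ((pvGet? kd.2 "name").getD "") ((pvGet? kd.2 "token").getD "") t)
    else none := by
  unfold pvToItem?; rw [hg]

theorem pvToItem?_type (kd : String × List (String × String))
    (x : List (String × String)) (h : pvToItem? kd = some x) :
    pvTypeOf x = "room" ∨ pvTypeOf x = "restaurant" ∨ pvTypeOf x = "garden" := by
  cases hg : pvGet? kd.2 "type" with
  | none => rw [pvToItem?_none kd hg] at h; exact absurd h (by simp)
  | some t =>
    rw [pvToItem?_some kd t hg] at h
    by_cases hc : (t == "room" || t == "restaurant" || t == "garden") = true
    · rw [if_pos hc] at h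
      have hx : x = pvItem kd.1 ((pvGet? kd.2 "name").getD "") ((pvGet? kd.2 "token").getD "") t :=
        (Option.some.inj h).symm
      subst hx
      rw [pvTypeOf_pvItem]
      simpa [beq_iff_eq, or_assoc] using hc
    · rw [if_neg hc] at h; exact absurd h (by simp)

-- pvBump computed on the literal three-entry dict
theorem pvBump_room (a b c : List (List (String × String))) (it : List (String × String)) :
    pvBump [("room", a), ("restaurant", b), ("garden", c)] "room" it
      = [("room", a ++ [it]), ("restaurant", b), ("garden", c)] := by
  simp [pvBump]

theorem pvBump_restaurant (a b c : List (List (String × String))) (it : List (String × String)) :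
    pvBump [("room", a), ("restaurant", b), ("garden", c)] "restaurant" it
      = [("room", a), ("restaurant", b ++ [it]), ("garden", c)] := by
  simp [pvBump]

theorem pvBump_garden (a b c : List (List (String × String))) (it : List (String × String)) :
    pvBump [("room", a), ("restaurant", b), ("garden", c)] "garden" it
      = [("room", a), ("restaurant", b), ("garden", c ++ [it])] := by
  simp [pvBump]

-- bucketing pass: folding pvBump over a list whose items all carry one of the three types
theorem pv_bucket :
    ∀ (s : List (List (String × String))) (a b c : List (List (String × String))),
    (∀ x ∈ s, pvTypeOf x = "room" ∨ pvTypeOf x = "restaurant" ∨ pvTypeOf x = "garden") →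
    s.foldl (fun d item => pvBump d (pvTypeOf item) item)
        [("room", a), ("restaurant", b), ("garden", c)]
      = [("room", a ++ s.filter (pvIsT "room")),
         ("restaurant", b ++ s.filter (pvIsT "restaurant")),
         ("garden", c ++ s.filter (pvIsT "garden"))] := by
  intro s
  induction s with
  | nil => intro a b c _; simp
  | cons x s ih =>
    intro a b c hall
    have hx := hall x (by simp)
    have hrest : ∀ y ∈ s, pvTypeOf y = "room" ∨ pvTypeOf y = "restaurant" ∨ pvTypeOf y = "garden" :=
      fun y hy => hall y (by simp [hy])
    rcases hx with hx | hx | hx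
    · rw [List.foldl_cons, hx, pvBump_room, ih _ _ _ hrest]
      simp [pvIsT, hx]
    · rw [List.foldl_cons, hx, pvBump_restaurant, ih _ _ _ hrest]
      simp [pvIsT, hx]
    · rw [List.foldl_cons, hx, pvBump_garden, ih _ _ _ hrest]
      simp [pvIsT, hx]

-- A's accumulation loop, characterised by the combined comprehension list
theorem pv_afold :
    ∀ (toks : List (String × List (String × String))) (a b c : List (List (String × String))),
    toks.foldl (fun locs kd =>
        match pvGet? kd.2 "type" with
        | some t =>
          if (locs.find? (fun e => e.1 == t)).isSome then
            pvBump locs t (pvItem kd.1 ((pvGet? kd.2 "name").getD "")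
              ((pvGet? kd.2 "token").getD "") t)
          else locs
        | none => locs)
        [("room", a), ("restaurant", b), ("garden", c)]
      = [("room", a ++ (toks.filterMap pvToItem?).filter (pvIsT "room")),
         ("restaurant", b ++ (toks.filterMap pvToItem?).filter (pvIsT "restaurant")),
         ("garden", c ++ (toks.filterMap pvToItem?).filter (pvIsT "garden"))] := by
  intro toks
  induction toks with
  | nil => intro a b c; simp
  | cons kd toks ih =>
    intro a b c
    cases hg : pvGet? kd.2 "type" with
    | none =>
      rw [List.foldl_cons, List.filterMap_cons, pvToItem?_none kd hg]
      simp only [hg]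
      exact ih a b c
    | some t =>
      rw [List.foldl_cons, List.filterMap_cons, pvToItem?_some kd t hg]
      simp only [hg]
      by_cases hr : t = "room"
      · subst hr
        rw [if_pos (by simp [List.find?]), pvBump_room, ih]
        simp [pvIsT, pvTypeOf_pvItem]
      · by_cases hs : t = "restaurant"
        · subst hs
          rw [if_pos (by simp [List.find?]), pvBump_restaurant, ih]
          simp [pvIsT, pvTypeOf_pvItem]
        · by_cases hgn : t = "garden"
          · subst hgn
            rw [if_pos (by simp [List.find?]), pvBump_garden, ih]
            simp [pvIsT, pvTypeOf_pvItem]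
          · have h1 : ("room" == t) = false := by
              simp only [beq_eq_false_iff_ne, ne_eq]; exact fun h => hr h.symm
            have h2 : ("restaurant" == t) = false := by
              simp only [beq_eq_false_iff_ne, ne_eq]; exact fun h => hs h.symm
            have h3 : ("garden" == t) = false := by
              simp only [beq_eq_false_iff_ne, ne_eq]; exact fun h => hgn h.symm
            have h4 : (t == "room") = false := by simpa using hr
            have h5 : (t == "restaurant") = false := by simpa using hs
            have h6 : (t == "garden") = false := by simpa using hgn
            rw [if_neg (by simp [List.find?, h1, h2, h3]), if_neg (by simp [h4, h5, h6])]
            exact ih a b c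

-- ===== VERDICT (by name: the statement is the Claim_ definition above) =====
theorem get_all_locations_spec : Claim_equal_get_all_locations := by
  intro tokens _ _
  show get_all_locations tokens = get_all_locations_alt tokens
  unfold get_all_locations get_all_locations_alt
  dsimp only []
  rw [pv_afold tokens [] [] []]
  rw [pv_bucket (PySem.List.sorted (tokens.filterMap pvToItem?) pvSortKey) [] [] []
    (fun x hx => by
      have hx' : x ∈ tokens.filterMap pvToItem? := (PySem.List.mem_sorted _ _ _ _).mp hx
      rcases List.mem_filterMap.mp hx' with ⟨kd, _, hkd⟩
      exact pvToItem?_type kd x hkd)]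
  simp only [List.map, List.nil_append]
  rw [pv_filter_sorted pvSortKey (pvIsT "room"), pv_filter_sorted pvSortKey (pvIsT "restaurant"),
    pv_filter_sorted pvSortKey (pvIsT "garden")]
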